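-- pv_equiv track=rewrite | github.com/Ag3497120/verantyx-v6 | synth_results/9af7a82c.py | transform
-- ===== SOURCE A (Python) =====
-- def transform(grid):
--     from collections import Counter
--     flat = [v for row in grid for v in row]
--     counts = Counter(flat)
--     # Sort by count descending
--     sorted_vals = sorted(counts.items(), key=lambda x: -x[1])
--
--     max_count = sorted_vals[0][1]
--     num_cols = len(sorted_vals)
--
--     result = []
--     for row_idx in range(max_count):
--         row = []
--         for val, cnt in sorted_vals:
--             if row_idx < cnt:
--                 row.append(val)
--             else:
--                 row.append(0)
--         result.append(row)
--     return result
-- ===== SOURCE B (Python) =====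
-- def transform(grid):
--     from collections import Counter
--     flat = [v for row in grid for v in row]
--     counts = Counter(flat)
--     sorted_vals = sorted(counts.items(), key=lambda x: -x[1])
--     max_count = sorted_vals[0][1]
--     cols = [[val] * cnt + [0] * (max_count - cnt) for val, cnt in sorted_vals]
--     return [list(r) for r in zip(*cols)]
-- ===== Notes on version B (the rewrite author's own statement) =====
-- stated objective: alternative
-- what changed: B builds one full column per value as [val]*cnt + [0]*(max_count-cnt) and transposes the column list with zip(*cols), instead of A's row-major loop that tests row_idx < cnt for every (row, value) cell.
import Mathlib
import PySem

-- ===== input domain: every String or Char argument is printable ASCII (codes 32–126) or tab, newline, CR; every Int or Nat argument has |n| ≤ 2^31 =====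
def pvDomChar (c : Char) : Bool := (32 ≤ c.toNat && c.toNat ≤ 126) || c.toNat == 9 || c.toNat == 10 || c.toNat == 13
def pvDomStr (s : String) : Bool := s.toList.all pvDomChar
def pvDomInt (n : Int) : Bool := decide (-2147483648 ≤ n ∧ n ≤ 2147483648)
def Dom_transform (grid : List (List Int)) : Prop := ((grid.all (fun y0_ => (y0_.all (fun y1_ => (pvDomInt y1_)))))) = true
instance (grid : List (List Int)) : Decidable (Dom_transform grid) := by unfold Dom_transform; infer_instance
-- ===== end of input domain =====

-- B is an alternative decomposition of the same cost: it builds one full column per value and transposes with zip(*cols) instead of A's row-major per-cell scan.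

-- ===== PORT A =====
def transform (grid : List (List Int)) : List (List Int) :=
  let flat := grid.flatMap (fun row => row)
  let counts := PySem.Dict.counter flat
  let sorted_vals := PySem.List.sorted counts.items (fun x => -x.2) false
  let max_count := (sorted_vals.headD (0, 0)).2
  (PySem.List.pyRange 0 max_count 1).map (fun row_idx =>
    sorted_vals.map (fun p => if row_idx < p.2 then p.1 else 0))

-- ===== PORT B =====
-- zip(*cols) for lists of Int, exactly Python's semantics (stops at the shortest list)
def pyZipStar (cols : List (List Int)) : List (List Int) :=
  match cols with
  | [] => []
  | c :: rest =>
    if h : (c :: rest).all (fun l => !l.isEmpty) then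
      ((c :: rest).map (fun l => l.headD 0)) :: pyZipStar ((c :: rest).map (fun l => l.tail))
    else []
termination_by (cols.headD []).length
decreasing_by
  simp only [List.all_cons, Bool.and_eq_true] at h
  simp only [List.headD_cons, List.map_cons, List.length_tail]
  have hc : c ≠ [] := by simpa using h.1
  have : 0 < c.length := List.length_pos_iff.mpr hc
  omega

def transform_alt (grid : List (List Int)) : List (List Int) :=
  let flat := grid.flatMap (fun row => row)
  let counts := PySem.Dict.counter flat
  let sorted_vals := PySem.List.sorted counts.items (fun x => -x.2) false
  let max_count := (sorted_vals.headD (0, 0)).2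
  let cols := sorted_vals.map (fun p =>
    List.replicate p.2.toNat p.1 ++ List.replicate (max_count - p.2).toNat 0)
  pyZipStar cols

-- ===== PRECONDITION & SPEC =====
-- Pre_ excludes only grids with no values at all: there sorted_vals[0] raises IndexError (in both A and B).
def Pre_transform (grid : List (List Int)) : Prop := grid.flatMap (fun row => row) ≠ []
instance (grid : List (List Int)) : Decidable (Pre_transform grid) := by unfold Pre_transform; infer_instance
def pvWitness_transform : List (List Int) := [[1, 2], [2]]
def Spec_transform (grid : List (List Int)) (out : List (List Int)) : Prop := out = transform_alt grid
instance (grid : List (List Int)) (out : List (List Int)) : Decidable (Spec_transform grid out) := by unfold Spec_transform; infer_instance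

-- ===== CLAIM (what is proved, stated in full; the proofs are below) =====
def Claim_equal_transform : Prop := ∀ (grid : List (List Int)), Dom_transform grid → Pre_transform grid → Spec_transform grid (transform grid)

-- ===== LEMMAS AND PROOFS =====

-- pyZipStar of a nonempty list of equal-length columns is the index-wise transpose
theorem pyZipStar_eq_transpose (k : Nat) :
    ∀ cols : List (List Int), cols ≠ [] → (∀ c ∈ cols, c.length = k) →
      pyZipStar cols = (List.range k).map (fun i => cols.map (fun c => c.getD i 0)) := by
  induction k with
  | zero =>
    rintro (_ | ⟨c, rest⟩) hne hlen
    · exact absurd rfl hne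
    · have hc : c = [] := List.eq_nil_of_length_eq_zero (hlen c (by simp))
      rw [pyZipStar]
      have : ¬ ((c :: rest).all (fun l => !l.isEmpty) = true) := by simp [hc]
      simp [this]
  | succ k ih =>
    rintro (_ | ⟨c, rest⟩) hne hlen
    · exact absurd rfl hne
    · rw [pyZipStar]
      have hall : (c :: rest).all (fun l => !l.isEmpty) = true := by
        simp only [List.all_eq_true]
        intro l hl
        have := hlen l hl
        simp [← List.length_pos_iff]
        omega
      rw [dif_pos hall]
      have hrec := ih ((c :: rest).map (fun l => l.tail)) (by simp)
        (by intro t ht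
            simp only [List.mem_map] at ht
            obtain ⟨l, hl, rfl⟩ := ht
            have := hlen l hl
            simp [List.length_tail]; omega)
      rw [hrec, List.range_succ_eq_map, List.map_cons]
      congr 1
      · show ((c :: rest).map (fun l => l.headD 0)) = (c :: rest).map (fun l => l.getD 0 0)
        apply List.map_congr_left
        intro l _
        cases l with
        | nil => simp
        | cons x xs => simp [List.getD]
      · rw [List.map_map]
        apply List.map_congr_left
        intro i _
        simp only [Function.comp_apply]
        rw [List.map_map]
        apply List.map_congr_left
        intro l _
        cases l with
        | nil => simp
        | cons x xs => simp [List.getD]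

-- a column [val]*cnt + [0]*(m-cnt), read at row i, is A's cell value
theorem col_getD (v cnt m : Int) (i : Nat) (h1 : 1 ≤ cnt) :
    (List.replicate cnt.toNat v ++ List.replicate (m - cnt).toNat 0).getD i 0 =
      if (i : Int) < cnt then v else 0 := by
  by_cases hc : (i : Int) < cnt
  · have hlt : i < cnt.toNat := by omega
    rw [if_pos hc, List.getD, List.getElem?_append_left (by simpa using hlt)]
    simp [hlt]
  · have hge : cnt.toNat ≤ i := by omega
    rw [if_neg hc, List.getD, List.getElem?_append_right (by simpa using hge)]
    simp only [List.getElem?_replicate]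
    split <;> rfl

theorem transform_spec : Claim_equal_transform := by
  intro grid _ hpre
  unfold Spec_transform transform transform_alt
  dsimp only
  set flat := grid.flatMap (fun row => row) with hflat
  set items := (PySem.Dict.counter flat).items with hitems
  set sv := PySem.List.sorted items (fun x => -x.2) false with hsv
  -- sv is nonempty
  have hsvne : sv ≠ [] := by
    rw [hsv, Ne, PySem.List.sorted_eq_nil_iff, hitems, PySem.Dict.items_counter]
    intro h
    have : PySem.Set.ofList flat = [] := by simpa using h
    obtain ⟨x, tl, hfx⟩ := List.exists_cons_of_ne_nil hpre
    have : x ∈ PySem.Set.ofList flat := by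
      rw [PySem.Set.mem_ofList, hflat, hfx]; simp
    simp_all
  obtain ⟨sv0, svt, hsveq⟩ := List.exists_cons_of_ne_nil hsvne
  set m := (sv.headD (0, 0)).2 with hm
  have hm0 : m = sv0.2 := by rw [hm, hsveq]; rfl
  -- every count is between 1 and m
  have hle : ∀ p ∈ sv, p.2 ≤ m := by
    intro p hp
    have hpi : p ∈ items := (PySem.List.mem_sorted _ _ _ _).mp hp
    have := PySem.List.key_head_sorted_le items (fun x => -x.2) hsveq p hpi
    simp only at this
    rw [hm0]
    omega
  have hge1 : ∀ p ∈ sv, 1 ≤ p.2 := by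
    intro p hp
    have hpi : p ∈ items := (PySem.List.mem_sorted _ _ _ _).mp hp
    rw [hitems, PySem.Dict.items_counter] at hpi
    simp only [List.mem_map] at hpi
    obtain ⟨k, hk, rfl⟩ := hpi
    have hkf : k ∈ flat := (PySem.Set.mem_ofList _ _).mp hk
    have : 0 < flat.count k := List.count_pos_iff.mpr hkf
    show (1 : Int) ≤ (flat.count k : Int)
    exact_mod_cast this
  -- transpose B's columns
  set cols := sv.map (fun p => List.replicate p.2.toNat p.1 ++ List.replicate (m - p.2).toNat 0) with hcols
  have hclen : ∀ c ∈ cols, c.length = m.toNat := by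
    intro c hc
    rw [hcols] at hc
    simp only [List.mem_map] at hc
    obtain ⟨p, hp, rfl⟩ := hc
    have := hle p hp; have := hge1 p hp
    simp; omega
  have hcne : cols ≠ [] := by rw [hcols]; simpa using hsvne
  rw [pyZipStar_eq_transpose m.toNat cols hcne hclen]
  -- rewrite A's range of rows
  have hmpos : (0 : Int) ≤ m := by have := hge1 sv0 (by rw [hsveq]; simp); omega
  rw [PySem.List.pyRange_one]
  simp only [Int.sub_zero, List.map_map]
  apply List.map_congr_left
  intro i hi
  rw [List.mem_range] at hi
  simp only [Function.comp_apply]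
  rw [hcols, List.map_map]
  apply List.map_congr_left
  intro p hp
  simp only [Function.comp_apply]
  rw [col_getD p.1 p.2 m i (hge1 p hp)]
  norm_num
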